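-- pv_equiv track=rewrite | github.com/lxyshuai/leetcode | 151. Reverse Words in a String.py | trim_sides
-- ===== SOURCE A (Python) =====
-- def trim_sides(arr):
--     '''str.strip() basically'''
--     if ''.join(arr).isspace():
--         return []
--     left = 0
--     right = len(arr) - 1
--     while left < right:
--         if arr[right].isspace():
--             right -= 1
--         else:
--             break
--     while left < right:
--         if arr[left].isspace():
--             left += 1
--         else:
--             break
--     return arr[left:right + 1]
-- ===== SOURCE B (Python) =====
-- def trim_sides(arr):
--     '''str.strip() basically'''
--     idx = [i for i in range(len(arr)) if not arr[i].isspace()]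
--     if not idx:
--         return []
--     return arr[idx[0]: idx[-1] + 1]
-- ===== Notes on version B (the rewrite author's own statement) =====
-- stated objective: alternative
-- what changed: B replaces A's join/isspace whole-list test and the two end-trimming while loops by one pass collecting the indices of non-whitespace elements and slicing from the first to the last such index.
-- outside the precondition, e.g. on trim_sides(['', ' ']): A returns [], B returns ['']
import Mathlib
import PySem

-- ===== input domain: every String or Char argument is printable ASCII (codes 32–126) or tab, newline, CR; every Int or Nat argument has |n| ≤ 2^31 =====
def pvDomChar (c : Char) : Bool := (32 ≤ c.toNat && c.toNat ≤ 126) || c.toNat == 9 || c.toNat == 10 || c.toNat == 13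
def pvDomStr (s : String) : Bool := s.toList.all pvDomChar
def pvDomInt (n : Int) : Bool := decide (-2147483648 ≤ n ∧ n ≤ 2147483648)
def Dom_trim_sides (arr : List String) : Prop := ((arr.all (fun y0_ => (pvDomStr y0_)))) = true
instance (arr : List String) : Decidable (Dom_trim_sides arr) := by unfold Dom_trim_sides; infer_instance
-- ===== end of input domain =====

-- B is an alternative decomposition: one pass collecting indices of non-whitespace elements, then one slice.

-- ===== PORT A =====
-- the first while loop (left is still 0 there): while 0 < right and arr[right].isspace(): right -= 1
-- (indices are in range throughout the loop, so arr.getD i "" is exactly Python's arr[i])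
def pvTrimR (arr : List String) : Nat → Nat
  | 0 => 0
  | r + 1 => if PySem.Str.strIsspace (arr.getD (r + 1) "") then pvTrimR arr r else r + 1

-- the second while loop: while left < right and arr[left].isspace(): left += 1
def pvTrimL (arr : List String) (r l : Nat) : Nat :=
  if l < r then
    if PySem.Str.strIsspace (arr.getD l "") then pvTrimL arr r (l + 1) else l
  else l
termination_by r - l

-- len(arr)-1 is taken in Nat (clamped to 0 for arr = []); exact, since for arr = [] both
-- Python's arr[0:0] and this arr[0:1] are [].
def trim_sides (arr : List String) : List String :=
  if PySem.Str.strIsspace (PySem.Str.join "" arr) then []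
  else
    let right := pvTrimR arr (arr.length - 1)
    let left := pvTrimL arr right 0
    PySem.List.slice arr (some (left : Int)) (some ((right : Int) + 1))

-- ===== PORT B =====
-- idx = [i for i in range(len(arr)) if not arr[i].isspace()]
def pvIdx (arr : List String) : List Nat :=
  (List.range arr.length).filter (fun i => !(PySem.Str.strIsspace (arr.getD i "")))

def trim_sides_alt (arr : List String) : List String :=
  match pvIdx arr with
  | [] => []
  | i0 :: rest =>
      PySem.List.slice arr (some (i0 : Int))
        (some (((i0 :: rest).getLast (List.cons_ne_nil _ _) : Int) + 1))

-- ===== PRECONDITION & SPEC =====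
-- Pre_ excludes lists whose elements are all whitespace-only-or-empty with at least one
-- nonempty and at least one empty element: there A's join-based emptiness test returns []
-- while the element-wise view keeps the empty strings — both readings of this degenerate
-- corner are defensible.
def pvAllWs (s : String) : Bool := s.toList.all PySem.Chars.isspace
def Pre_trim_sides (arr : List String) : Prop :=
  ¬ ((arr.all pvAllWs && arr.any (fun s => !(s.toList.isEmpty)) &&
      arr.any (fun s => s.toList.isEmpty)) = true)
instance (arr : List String) : Decidable (Pre_trim_sides arr) := by
  unfold Pre_trim_sides; infer_instance

def pvWitness_trim_sides : List String := [" ", "ab", " "]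

def Spec_trim_sides (arr : List String) (out : List String) : Prop := out = trim_sides_alt arr
instance (arr : List String) (out : List String) : Decidable (Spec_trim_sides arr out) := by
  unfold Spec_trim_sides; infer_instance

-- ===== CLAIM (what is proved, stated in full; the proofs are below) =====
def Claim_equal_trim_sides : Prop :=
  ∀ (arr : List String), Dom_trim_sides arr → Pre_trim_sides arr →
    Spec_trim_sides arr (trim_sides arr)

-- ===== LEMMAS AND PROOFS =====

lemma pv_join_flatten (lss : List (List Char)) : PySem.Chars.join [] lss = lss.flatten := by
  induction lss with
  | nil => simpa using PySem.Chars.join_nil ([] : List Char)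
  | cons p rest ih =>
    cases rest with
    | nil => simpa using PySem.Chars.join_singleton ([] : List Char) p
    | cons q r =>
      rw [PySem.Chars.join_cons_cons]
      simp [ih]

lemma pv_cisspace_iff (cs : List Char) :
    PySem.Chars.strIsspace cs = true ↔ cs ≠ [] ∧ ∀ c ∈ cs, PySem.Chars.isspace c = true := by
  simp [PySem.Chars.strIsspace, List.isEmpty_iff, List.all_eq_true]

lemma pv_isspace_iff (s : String) :
    PySem.Str.strIsspace s = true ↔
      s.toList ≠ [] ∧ ∀ c ∈ s.toList, PySem.Chars.isspace c = true := by
  rw [PySem.Str.strIsspace_eq, pv_cisspace_iff]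

lemma pv_join_isspace_iff (arr : List String) :
    PySem.Str.strIsspace (PySem.Str.join "" arr) = true ↔
      ((∃ s ∈ arr, s ≠ "") ∧ ∀ s ∈ arr, ∀ c ∈ s.toList, PySem.Chars.isspace c = true) := by
  rw [PySem.Str.strIsspace_eq, PySem.Str.toList_join]
  have h0 : ("" : String).toList = [] := rfl
  rw [h0, pv_join_flatten, pv_cisspace_iff]
  constructor
  · rintro ⟨hne, hall⟩
    refine ⟨?_, ?_⟩
    · by_contra hserr
      push_neg at hserr
      refine hne (List.flatten_eq_nil_iff.mpr ?_)
      intro l hl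
      obtain ⟨s, hs, rfl⟩ := List.mem_map.mp hl
      rw [hserr s hs]
      rfl
    · intro s hs c hc
      exact hall c (List.mem_flatten.mpr ⟨s.toList, List.mem_map.mpr ⟨s, hs, rfl⟩, hc⟩)
  · rintro ⟨⟨s, hs, hsne⟩, hall⟩
    refine ⟨?_, ?_⟩
    · intro hfl
      have := List.flatten_eq_nil_iff.mp hfl s.toList (List.mem_map.mpr ⟨s, hs, rfl⟩)
      exact hsne (String.toList_eq_nil_iff.mp this)
    · intro c hc
      obtain ⟨l, hl, hcl⟩ := List.mem_flatten.mp hc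
      obtain ⟨t, ht, rfl⟩ := List.mem_map.mp hl
      exact hall t ht c hcl

lemma pv_getD_mem (arr : List String) (i : Nat) (h : i < arr.length) : arr.getD i "" ∈ arr := by
  rw [List.getD_eq_getElem arr "" h]
  exact List.getElem_mem h

lemma pv_mem_idx (arr : List String) (i : Nat) :
    i ∈ pvIdx arr ↔ i < arr.length ∧ PySem.Str.strIsspace (arr.getD i "") = false := by
  simp [pvIdx, List.mem_filter]

lemma pv_idx_pairwise (arr : List String) : (pvIdx arr).Pairwise (· < ·) :=
  List.pairwise_lt_range.filter _

lemma pv_le_getLast : ∀ (l : List Nat), l.Pairwise (· < ·) → ∀ (hne : l ≠ []),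
    ∀ x ∈ l, x ≤ l.getLast hne := by
  intro l
  induction l with
  | nil => intro _ hne; exact absurd rfl hne
  | cons a t ih =>
    intro h hne x hx
    cases t with
    | nil =>
      simp only [List.mem_singleton] at hx
      simp [hx, List.getLast]
    | cons b t' =>
      rw [List.getLast_cons (by simp)]
      rcases List.mem_cons.mp hx with rfl | hx'
      · have hab : x < b := (List.pairwise_cons.mp h).1 b (by simp)
        have hb : b ≤ (b :: t').getLast (by simp) :=
          ih (List.pairwise_cons.mp h).2 (by simp) b (by simp)
        omega
      · exact ih (List.pairwise_cons.mp h).2 (by simp) x hx'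

lemma pv_trimR_eq (arr : List String) (last : Nat)
    (hP : PySem.Str.strIsspace (arr.getD last "") = false) :
    ∀ r, last ≤ r →
      (∀ j, last < j → j ≤ r → PySem.Str.strIsspace (arr.getD j "") = true) →
      pvTrimR arr r = last := by
  intro r
  induction r with
  | zero =>
    intro hlr _
    have h0 : last = 0 := Nat.le_zero.mp hlr
    simp [pvTrimR, h0]
  | succ r ih =>
    intro hlr hjs
    have hstep : pvTrimR arr (r + 1) =
        if PySem.Str.strIsspace (arr.getD (r + 1) "") then pvTrimR arr r else r + 1 := rfl
    by_cases hl : last = r + 1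
    · subst hl
      rw [hstep, hP]
      simp
    · have hlr' : last ≤ r := by omega
      have hPr : PySem.Str.strIsspace (arr.getD (r + 1) "") = true :=
        hjs (r + 1) (by omega) (le_refl _)
      rw [hstep, hPr]
      simp only [if_true]
      exact ih hlr' (fun j h1 h2 => hjs j h1 (by omega))

lemma pv_trimL_eq (arr : List String) (first : Nat)
    (hP : PySem.Str.strIsspace (arr.getD first "") = false) :
    ∀ k l r, first - l = k → l ≤ first → first ≤ r →
      (∀ j, l ≤ j → j < first → PySem.Str.strIsspace (arr.getD j "") = true) →
      pvTrimL arr r l = first := by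
  intro k
  induction k with
  | zero =>
    intro l r hk hl _ _
    have hlf : l = first := by omega
    subst hlf
    rw [pvTrimL]
    by_cases hlr : l < r
    · rw [if_pos hlr, hP]
      simp
    · rw [if_neg hlr]
  | succ k ih =>
    intro l r hk hl hr hjs
    have hlf : l < first := by omega
    have hPl : PySem.Str.strIsspace (arr.getD l "") = true := hjs l (le_refl _) hlf
    have hlr : l < r := by omega
    rw [pvTrimL, if_pos hlr, hPl]
    simp only [if_true]
    exact ih (l + 1) r (by omega) (by omega) hr (fun j h1 h2 => hjs j (by omega) h2)

-- ===== VERDICT (by name: the statement is the Claim_ definition above) =====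
theorem trim_sides_spec : Claim_equal_trim_sides := by
  intro arr _ hpre
  show trim_sides arr = trim_sides_alt arr
  by_cases hj : PySem.Str.strIsspace (PySem.Str.join "" arr) = true
  · -- A returns []; Pre_ rules out empty-string elements, so every element is isspace and idx = []
    have hj2 := hj
    rw [PySem.Str.strIsspace_eq, PySem.Str.toList_join] at hj2
    simp at hj2
    have hA : trim_sides arr = [] := by simp [trim_sides, hj2]
    obtain ⟨hex, hall⟩ := (pv_join_isspace_iff arr).mp hj
    have hno : ("" : String) ∉ arr := by
      intro hmem
      apply hpre
      simp only [Bool.and_eq_true, List.all_eq_true, List.any_eq_true]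
      refine ⟨⟨?_, ?_⟩, ?_⟩
      · intro s hs
        simp only [pvAllWs, List.all_eq_true]
        exact fun c hc => hall s hs c hc
      · obtain ⟨s, hs, hsne⟩ := hex
        refine ⟨s, hs, ?_⟩
        cases hL : s.toList with
        | nil => exact absurd (String.toList_eq_nil_iff.mp hL) hsne
        | cons a t => rfl
      · exact ⟨"", hmem, rfl⟩
    have hidx : pvIdx arr = [] := by
      by_contra hne
      obtain ⟨i0, hmem⟩ := List.exists_mem_of_ne_nil (pvIdx arr) hne
      obtain ⟨hi, hPi⟩ := (pv_mem_idx arr i0).mp hmem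
      have hsm : arr.getD i0 "" ∈ arr := pv_getD_mem arr i0 hi
      have hsne : arr.getD i0 "" ≠ "" := fun h => hno (h ▸ hsm)
      have hT : PySem.Str.strIsspace (arr.getD i0 "") = true :=
        (pv_isspace_iff _).mpr
          ⟨fun h => hsne (String.toList_eq_nil_iff.mp h), fun c hc => hall _ hsm c hc⟩
      rw [hT] at hPi
      cases hPi
    rw [hA]
    simp [trim_sides_alt, hidx]
  · have hj2 := hj
    rw [PySem.Str.strIsspace_eq, PySem.Str.toList_join] at hj2
    simp at hj2
    have hAdef : trim_sides arr =
        PySem.List.slice arr (some ((pvTrimL arr (pvTrimR arr (arr.length - 1)) 0 : Nat) : Int))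
          (some (((pvTrimR arr (arr.length - 1) : Nat) : Int) + 1)) := by
      simp [trim_sides, hj2]
    rcases hidx : pvIdx arr with _ | ⟨i0, rest⟩
    · -- idx empty and the join is not all-whitespace: arr must be []
      have harr : arr = [] := by
        cases harr' : arr with
        | nil => rfl
        | cons s t =>
          exfalso
          subst harr'
          have hallP : ∀ i, i < (s :: t).length →
              PySem.Str.strIsspace ((s :: t).getD i "") = true := by
            intro i hi
            by_contra h
            have hmem : i ∈ pvIdx (s :: t) :=
              (pv_mem_idx _ i).mpr ⟨hi, by simpa using h⟩
            rw [hidx] at hmem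
            cases hmem
          apply hj
          apply (pv_join_isspace_iff _).mpr
          constructor
          · have h0 := hallP 0 (by simp)
            have hg0 : ((s :: t).getD 0 "") = s := rfl
            rw [hg0] at h0
            obtain ⟨hne, _⟩ := (pv_isspace_iff s).mp h0
            exact ⟨s, by simp, fun h => hne (by simp [h])⟩
          · intro u hu c hc
            obtain ⟨i, hi, hig⟩ := List.mem_iff_getElem.mp hu
            have hP := hallP i hi
            rw [List.getD_eq_getElem _ "" hi, hig] at hP
            exact ((pv_isspace_iff u).mp hP).2 c hc
      subst harr
      have h1 : pvTrimL ([] : List String) 0 0 = 0 := by rw [pvTrimL]; simp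
      have hs : ∀ (a b : Int), PySem.List.slice ([] : List String) (some a) (some b) = [] := by
        intro a b
        refine List.eq_nil_iff_forall_not_mem.mpr (fun x hx => ?_)
        simpa using PySem.List.mem_of_mem_slice _ _ _ hx
      simp [hAdef, trim_sides_alt, pvIdx, pvTrimR, h1, hs]
    · set last := (i0 :: rest).getLast (List.cons_ne_nil _ _) with hlastdef
      have hpw : (i0 :: rest).Pairwise (· < ·) := by
        rw [← hidx]; exact pv_idx_pairwise arr
      have hmem_iff : ∀ j, j ∈ i0 :: rest ↔
          (j < arr.length ∧ PySem.Str.strIsspace (arr.getD j "") = false) := by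
        intro j; rw [← hidx]; exact pv_mem_idx arr j
      have hi0 := (hmem_iff i0).mp (by simp)
      have hlast_mem : last ∈ i0 :: rest := List.getLast_mem _
      have hlast := (hmem_iff last).mp hlast_mem
      have hmax : ∀ x ∈ i0 :: rest, x ≤ last :=
        pv_le_getLast _ hpw (List.cons_ne_nil _ _)
      have hmin : ∀ x ∈ i0 :: rest, i0 ≤ x := by
        intro x hx
        rcases List.mem_cons.mp hx with rfl | hx'
        · exact le_refl _
        · exact le_of_lt ((List.pairwise_cons.mp hpw).1 x hx')
      have hiole : i0 ≤ last := hmin last hlast_mem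
      have hR : pvTrimR arr (arr.length - 1) = last := by
        apply pv_trimR_eq arr last hlast.2
        · omega
        · intro j h1 h2
          by_contra h
          have hjm : j ∈ i0 :: rest :=
            (hmem_iff j).mpr ⟨by omega, by simpa using h⟩
          have := hmax j hjm
          omega
      have hL : pvTrimL arr last 0 = i0 := by
        apply pv_trimL_eq arr i0 hi0.2 (i0 - 0) 0 last rfl (Nat.zero_le _) hiole
        intro j _ h2
        by_contra h
        have hjm : j ∈ i0 :: rest :=
          (hmem_iff j).mpr ⟨by omega, by simpa using h⟩
        have := hmin j hjm
        omega
      rw [hAdef, hR, hL]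
      simp only [trim_sides_alt, hidx]
      rw [hlastdef]
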